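-- pv_equiv track=rewrite | github.com/gy001/pypcs | mle.py | evaluate_from_coeffs
-- ===== SOURCE A (Python) =====
-- def evaluate_from_coeffs(coeffs, zs):
--     z = len(zs)
--     f = coeffs
--
--     half = len(f) >> 1
--     for z in zs:
--         even = f[::2]
--         odd = f[1::2]
--         f = [even[i] + z * odd[i] for i in range(half)]
--         half >>= 1
--     return f[0]
-- ===== SOURCE B (Python) =====
-- def evaluate_from_coeffs(coeffs, zs):
--     n = len(zs)
--     result = 0
--     for idx in range(1 << n):
--         term = coeffs[idx]
--         for j in range(n):
--             if (idx >> j) & 1: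
--                 term *= zs[j]
--         result += term
--     return result
-- ===== Notes on version B (the rewrite author's own statement) =====
-- stated objective: alternative
-- what changed: A repeatedly halves the coefficient list by combining even/odd slices once per variable; B makes a single flat pass over all 2^n indices, multiplying each coefficient by the product of the zs-coordinates selected by the set bits of its index.
import Mathlib
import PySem

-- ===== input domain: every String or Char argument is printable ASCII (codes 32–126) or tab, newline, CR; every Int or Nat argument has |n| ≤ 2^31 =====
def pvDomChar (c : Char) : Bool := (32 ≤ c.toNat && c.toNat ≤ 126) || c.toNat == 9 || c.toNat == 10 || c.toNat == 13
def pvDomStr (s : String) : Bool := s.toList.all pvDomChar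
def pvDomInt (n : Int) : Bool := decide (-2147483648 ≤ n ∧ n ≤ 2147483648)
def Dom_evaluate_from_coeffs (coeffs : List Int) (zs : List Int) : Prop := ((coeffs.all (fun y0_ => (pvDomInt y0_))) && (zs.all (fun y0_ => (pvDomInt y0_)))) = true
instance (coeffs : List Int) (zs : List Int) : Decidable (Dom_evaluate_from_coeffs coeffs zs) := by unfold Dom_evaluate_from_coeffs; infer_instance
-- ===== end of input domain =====

-- B replaces A's repeated even/odd halving passes with one flat pass that multiplies each
-- coefficient by the product of the zs-coordinates selected by the bits of its index
-- (objective: alternative decomposition; A mutates nothing, return values only).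

-- ===== PORT A =====
-- 'z = len(zs)' in A is dead code (immediately shadowed by the loop variable), so it is not ported.
def evaluate_from_coeffs (coeffs : List Int) (zs : List Int) : Int :=
  let f0 := coeffs
  let half0 : Nat := coeffs.length >>> 1
  let st := zs.foldl (fun (st : List Int × Nat) z =>
      let f := st.1
      let half := st.2
      -- f[::2] and f[1::2]; slice? is `some` whenever step ≠ 0, so `.getD []` never fires
      let even := (PySem.List.slice? f none none 2).getD []
      let odd := (PySem.List.slice? f (some 1) none 2).getD []
      -- [even[i] + z * odd[i] for i in range(half)]; indices are in range for every input
      -- (half = len f >> 1 is an invariant of the loop, len odd = half, len even ≥ half),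
      -- so getD 0 is exact
      let f' := (List.range half).map (fun i => even.getD i 0 + z * odd.getD i 0)
      (f', half >>> 1)) (f0, half0)
  -- f[0]; the IndexError on an empty f is exactly what Pre_ excludes
  st.1.getD 0 0

-- ===== PORT B =====
def evaluate_from_coeffs_alt (coeffs : List Int) (zs : List Int) : Int :=
  let n := zs.length
  (List.range (1 <<< n)).foldl (fun result idx =>
    -- coeffs[idx]; in range under Pre_ (2^n ≤ len coeffs), so getD 0 is exact there
    let term := coeffs.getD idx 0
    let term := (List.range n).foldl (fun term j =>
        -- if (idx >> j) & 1: term *= zs[j]   (j < n, so zs.getD is in range)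
        if (idx >>> j) &&& 1 ≠ 0 then term * zs.getD j 0 else term) term
    result + term) 0

-- ===== PRECONDITION & SPEC =====
-- Pre_ excludes exactly the inputs with len(coeffs) < 2^len(zs), on which BOTH A and B raise
-- IndexError (A on the final f[0], B on coeffs[idx]); A returns on every other input.
def Pre_evaluate_from_coeffs (coeffs : List Int) (zs : List Int) : Prop :=
  2 ^ zs.length ≤ coeffs.length
instance (coeffs : List Int) (zs : List Int) : Decidable (Pre_evaluate_from_coeffs coeffs zs) := by
  unfold Pre_evaluate_from_coeffs; infer_instance

def pvWitness_evaluate_from_coeffs : List Int × List Int := ([3, -5, 7, 2], [4, 9])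

def Spec_evaluate_from_coeffs (coeffs : List Int) (zs : List Int) (out : Int) : Prop := out = evaluate_from_coeffs_alt coeffs zs
instance (coeffs : List Int) (zs : List Int) (out : Int) : Decidable (Spec_evaluate_from_coeffs coeffs zs out) := by unfold Spec_evaluate_from_coeffs; infer_instance

-- ===== CLAIM (what is proved, stated in full; the proofs are below) =====
def Claim_equal_evaluate_from_coeffs : Prop := ∀ (coeffs : List Int) (zs : List Int), Dom_evaluate_from_coeffs coeffs zs → Pre_evaluate_from_coeffs coeffs zs → Spec_evaluate_from_coeffs coeffs zs (evaluate_from_coeffs coeffs zs)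

-- ===== LEMMAS AND PROOFS =====

-- every other element of f, starting at f[0]  (the value of f[::2])
def pvEvens : List Int → List Int
  | [] => []
  | [a] => [a]
  | a :: _ :: t => a :: pvEvens t

-- one halving round of A: pair up adjacent elements
def pvPair (z : Int) : List Int → List Int
  | a :: b :: t => (a + z * b) :: pvPair z t
  | _ => []

-- the product of zs[j] over the set bits j of idx
def pvP : List Int → Nat → Int
  | [], _ => 1
  | z :: zs, idx => (if idx % 2 = 1 then z else 1) * pvP zs (idx / 2)

-- B as a mathematical sum
def pvSum (f : List Int) (zs : List Int) : Int :=
  ∑ idx ∈ Finset.range (2 ^ zs.length), f.getD idx 0 * pvP zs idx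

theorem pvEvens_filterMap (f : List Int) :
    List.filterMap (fun k => f[2 * k]?) (List.range ((f.length + 1) / 2)) = pvEvens f := by
  induction f using pvEvens.induct with
  | case1 => simp [pvEvens]
  | case2 a => simp [pvEvens]
  | case3 a b t ih =>
    have hlen : ((a :: b :: t).length + 1) / 2 = (t.length + 1) / 2 + 1 := by
      simp; omega
    rw [hlen, List.range_succ_eq_map, List.filterMap_cons, List.filterMap_map]
    have : (fun k => (a :: b :: t)[2 * (k + 1)]?) = fun k => t[2 * k]? := by
      funext k
      have : 2 * (k + 1) = 2 * k + 1 + 1 := by omega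
      rw [this, List.getElem?_cons_succ, List.getElem?_cons_succ]
    simp only [Function.comp_def]
    simp only [this]
    simp [pvEvens, ih]

theorem slice?_evens (f : List Int) :
    PySem.List.slice? f none none 2 = some (pvEvens f) := by
  rw [PySem.List.slice?, PySem.List.sliceIndices]
  norm_num
  have hcount : (if 0 < f.length then (((f.length : Int) + 2 - 1) / 2).toNat else 0)
      = (f.length + 1) / 2 := by split <;> omega
  have harg : (fun x : Nat => f[((2 : Int) * (x : Int)).toNat]?) = fun k => f[2 * k]? := by
    funext k
    have : ((2 : Int) * (k : Int)).toNat = 2 * k := by omega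
    rw [this]
  rw [hcount, harg, pvEvens_filterMap]

theorem slice?_odds (f : List Int) :
    PySem.List.slice? f (some 1) none 2 = some (pvEvens f.tail) := by
  cases f with
  | nil => simp [PySem.List.slice?, PySem.List.sliceIndices, pvEvens]
  | cons a t =>
    rw [PySem.List.slice?, PySem.List.sliceIndices]
    norm_num
    have hcount : (if 0 < t.length then (((t.length : Int) + 2 - 1) / 2).toNat else 0)
        = (t.length + 1) / 2 := by split <;> omega
    have harg : (fun x : Nat => (a :: t)[((1 : Int) + 2 * (x : Int)).toNat]?) = fun k => t[2 * k]? := by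
      funext k
      have : ((1 : Int) + 2 * (k : Int)).toNat = 2 * k + 1 := by omega
      rw [this, List.getElem?_cons_succ]
    rw [hcount, harg, pvEvens_filterMap]

theorem pvPair_length (z : Int) (f : List Int) : (pvPair z f).length = f.length / 2 := by
  induction f using pvEvens.induct <;> simp [pvPair, *] <;> omega

theorem pvEvens_cons_getD_succ (x : Int) (l : List Int) (i : Nat) :
    (pvEvens (x :: l)).getD (i + 1) 0 = (pvEvens l.tail).getD i 0 := by
  cases l with
  | nil => simp [pvEvens]
  | cons c t => simp [pvEvens]

theorem pvPair_eq_map (z : Int) (f : List Int) :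
    pvPair z f =
      (List.range (f.length >>> 1)).map
        (fun i => (pvEvens f).getD i 0 + z * (pvEvens f.tail).getD i 0) := by
  induction f using pvEvens.induct with
  | case3 a b t ih =>
    have hlen : (a :: b :: t).length >>> 1 = t.length >>> 1 + 1 := by
      simp [Nat.shiftRight_one]; omega
    rw [hlen, List.range_succ_eq_map, List.map_cons, List.map_map]
    have hhead : (pvEvens (a :: b :: t)).getD 0 0 + z * (pvEvens ((a :: b :: t).tail)).getD 0 0
        = a + z * b := by
      cases t <;> simp [pvEvens]
    have htail : ∀ i : Nat,
        (pvEvens (a :: b :: t)).getD (i + 1) 0 + z * (pvEvens ((a :: b :: t).tail)).getD (i + 1) 0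
        = (pvEvens t).getD i 0 + z * (pvEvens t.tail).getD i 0 := by
      intro i
      have h1 : (pvEvens (a :: b :: t)).getD (i + 1) 0 = (pvEvens t).getD i 0 := by
        simp [pvEvens]
      have h2 : (pvEvens ((a :: b :: t).tail)).getD (i + 1) 0 = (pvEvens t.tail).getD i 0 :=
        pvEvens_cons_getD_succ b t i
      rw [h1, h2]
    simp only [pvPair, Function.comp_def, htail, hhead]
    rw [ih]
  | case1 => simp [pvPair]
  | case2 a => simp [pvPair, Nat.shiftRight_one]

-- one iteration of A's loop body equals pvPair, under the loop invariant half = len f >> 1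
theorem pvStepA (z : Int) (f : List Int) :
    (List.range (f.length >>> 1)).map
      (fun i => ((PySem.List.slice? f none none 2).getD []).getD i 0 +
        z * ((PySem.List.slice? f (some 1) none 2).getD []).getD i 0) = pvPair z f := by
  rw [slice?_evens, slice?_odds, Option.getD_some, Option.getD_some, pvPair_eq_map]

-- A's fold with the (f, half) state equals a plain fold of pvPair
theorem pvAfold (zs : List Int) : ∀ f : List Int,
    (zs.foldl (fun (st : List Int × Nat) z =>
      ((List.range st.2).map (fun i =>
          ((PySem.List.slice? st.1 none none 2).getD []).getD i 0 +
            z * ((PySem.List.slice? st.1 (some 1) none 2).getD []).getD i 0),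
        st.2 >>> 1)) (f, f.length >>> 1)).1
    = zs.foldl (fun g z => pvPair z g) f := by
  induction zs with
  | nil => intro f; rfl
  | cons z zs ih =>
    intro f
    have hstep : ((List.range (f.length >>> 1)).map (fun i =>
          ((PySem.List.slice? f none none 2).getD []).getD i 0 +
            z * ((PySem.List.slice? f (some 1) none 2).getD []).getD i 0),
        (f.length >>> 1) >>> 1)
        = (pvPair z f, (pvPair z f).length >>> 1) := by
      rw [pvStepA, pvPair_length]
      simp [Nat.shiftRight_one]
    simp only [List.foldl_cons, hstep]
    exact ih (pvPair z f)

-- the inner loop of B computes t * pvP zs idx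
theorem pvBinner (zs : List Int) : ∀ (idx : Nat) (t : Int),
    (List.range zs.length).foldl (fun term j =>
        if (idx >>> j) &&& 1 ≠ 0 then term * zs.getD j 0 else term) t
    = t * pvP zs idx := by
  induction zs with
  | nil => intro idx t; simp [pvP]
  | cons z zs ih =>
    intro idx t
    have hlen : (z :: zs).length = zs.length + 1 := rfl
    rw [hlen, List.range_succ_eq_map, List.foldl_cons, List.foldl_map]
    have hbit0 : ((idx >>> 0) &&& 1 ≠ 0) ↔ idx % 2 = 1 := by
      simp [Nat.and_one_is_mod]
    have hstep : (fun (term : Int) (j : Nat) =>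
          if (idx >>> (j + 1)) &&& 1 ≠ 0 then term * (z :: zs).getD (j + 1) 0 else term)
        = fun term j => if ((idx / 2) >>> j) &&& 1 ≠ 0 then term * zs.getD j 0 else term := by
      funext term j
      have : idx >>> (j + 1) = (idx / 2) >>> j := by
        rw [Nat.add_comm j 1, Nat.shiftRight_add, Nat.shiftRight_one]
      rw [this]; rfl
    simp only [hstep]
    rw [ih (idx / 2)]
    by_cases h : idx % 2 = 1
    · rw [if_pos (hbit0.mpr h)]
      simp [pvP, h, mul_assoc, List.getD]
    · rw [if_neg (fun hc => h (hbit0.mp hc))]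
      simp [pvP, h]

-- a foldl-accumulated sum over range is a Finset.range sum
theorem pvFoldlSum (g : Nat → Int) (N : Nat) :
    (List.range N).foldl (fun acc idx => acc + g idx) 0 = ∑ idx ∈ Finset.range N, g idx := by
  induction N with
  | zero => simp
  | succ N ih => rw [List.range_succ, List.foldl_append, Finset.sum_range_succ, ih]; simp

theorem pvBsum (f zs : List Int) : evaluate_from_coeffs_alt f zs = pvSum f zs := by
  unfold evaluate_from_coeffs_alt pvSum
  simp only [Nat.one_shiftLeft]
  have : ∀ idx : Nat,
      (List.range zs.length).foldl (fun term j =>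
        if (idx >>> j) &&& 1 ≠ 0 then term * zs.getD j 0 else term) (f.getD idx 0)
      = f.getD idx 0 * pvP zs idx := fun idx => pvBinner zs idx _
  simp only [this]
  exact pvFoldlSum _ _

theorem pvSum2 (g : Nat → Int) (k : Nat) :
    ∑ i ∈ Finset.range (2 * k), g i = ∑ i ∈ Finset.range k, (g (2 * i) + g (2 * i + 1)) := by
  induction k with
  | zero => simp
  | succ k ih =>
    have : 2 * (k + 1) = (2 * k + 1) + 1 := by omega
    rw [this, Finset.sum_range_succ, Finset.sum_range_succ, Finset.sum_range_succ, ih]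
    ring

theorem pvPair_getD (z : Int) (f : List Int) : ∀ i : Nat, 2 * i + 1 < f.length →
    (pvPair z f).getD i 0 = f.getD (2 * i) 0 + z * f.getD (2 * i + 1) 0 := by
  induction f using pvEvens.induct with
  | case3 a b t ih =>
    intro i hi
    cases i with
    | zero => simp [pvPair]
    | succ i =>
      have h2 : 2 * (i + 1) = 2 * i + 1 + 1 := by omega
      have h2' : 2 * (i + 1) + 1 = (2 * i + 1) + 1 + 1 := by omega
      simp only [pvPair, List.getD_cons_succ, h2]
      exact ih i (by simp at hi ⊢; omega)
  | case1 => intro i hi; simp at hi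
  | case2 a => intro i hi; simp at hi

theorem pvSum_pair (z : Int) (zs f : List Int) (hlen : 2 ^ (zs.length + 1) ≤ f.length) :
    pvSum f (z :: zs) = pvSum (pvPair z f) zs := by
  unfold pvSum
  have hpow : 2 ^ (z :: zs).length = 2 * 2 ^ zs.length := by
    simp [pow_succ]; ring
  rw [hpow, pvSum2]
  refine Finset.sum_congr rfl ?_
  intro i hi
  have hi' : i < 2 ^ zs.length := Finset.mem_range.mp hi
  have hb : 2 * i + 1 < f.length := by
    have := pow_succ 2 zs.length
    omega
  rw [pvPair_getD z f i hb]
  have hP0 : pvP (z :: zs) (2 * i) = pvP zs i := by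
    have h1 : (2 * i) % 2 = 0 := by omega
    have h2 : (2 * i) / 2 = i := by omega
    simp [pvP, h1, h2]
  have hP1 : pvP (z :: zs) (2 * i + 1) = z * pvP zs i := by
    have h1 : (2 * i + 1) % 2 = 1 := by omega
    have h2 : (2 * i + 1) / 2 = i := by omega
    simp [pvP, h1, h2]
  rw [hP0, hP1]
  ring

theorem pvMain (zs : List Int) : ∀ f : List Int, 2 ^ zs.length ≤ f.length →
    (zs.foldl (fun g z => pvPair z g) f).getD 0 0 = pvSum f zs := by
  induction zs with
  | nil => intro f _; simp [pvSum, pvP]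
  | cons z zs ih =>
    intro f hf
    rw [List.foldl_cons]
    have hlen : 2 ^ zs.length ≤ (pvPair z f).length := by
      rw [pvPair_length]
      have := pow_succ 2 zs.length
      simp at hf
      omega
    rw [ih (pvPair z f) hlen, ← pvSum_pair z zs f (by simpa using hf)]

-- ===== VERDICT (by name: the statement is the Claim_ definition above) =====
theorem evaluate_from_coeffs_spec : Claim_equal_evaluate_from_coeffs := by
  intro coeffs zs _ hpre
  unfold Spec_evaluate_from_coeffs Pre_evaluate_from_coeffs at *
  rw [pvBsum]
  unfold evaluate_from_coeffs
  simp only []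
  rw [pvAfold zs coeffs]
  exact pvMain zs coeffs hpre
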